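-- pv_equiv track=rewrite | github.com/RibosomeK/SOFA-Cantonese-Model | change_scheme.py | _get_paris
-- ===== SOURCE A (Python) =====
-- from typing import NamedTuple, List, Tuple, Dict
--
-- class Pair(NamedTuple):
--     new: str
--     old: Tuple[str, ...]
--
-- def _get_paris(old: List[str], new: List[str]) -> List[Pair]:
--     start, end = 0, 0
--     buf = ""
--     ret = []
--     for idx in range(len(old)):
--         ph = new[idx]
--         if ph != "":
--             if buf != "":
--                 ret.append(Pair(buf, tuple(old[start:idx])))
--             buf = ph
--             start = idx
--     if buf == "":
--         raise ValueError(f"Invalid data!\nold: {old}, new: {new}")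
--     ret.append(Pair(buf, tuple(old[start:])))
--     return ret
-- ===== SOURCE B (Python) =====
-- from typing import NamedTuple, List, Tuple
--
-- class Pair(NamedTuple):
--     new: str
--     old: Tuple[str, ...]
--
-- def _get_paris(old: List[str], new: List[str]) -> List[Pair]:
--     bounds = [i for i in range(len(old)) if new[i] != ""]
--     if not bounds:
--         raise ValueError(f"Invalid data!\nold: {old}, new: {new}")
--     ret = []
--     for b, nb in zip(bounds, bounds[1:] + [len(old)]):
--         ret.append(Pair(new[b], tuple(old[b:nb])))
--     return ret
-- ===== Notes on version B (the rewrite author's own statement) =====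
-- stated objective: alternative
-- what changed: Replaces the running buf/start state machine with a boundary-index table built first, then a pairwise pass over consecutive boundaries emitting each segment directly.
import Mathlib
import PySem

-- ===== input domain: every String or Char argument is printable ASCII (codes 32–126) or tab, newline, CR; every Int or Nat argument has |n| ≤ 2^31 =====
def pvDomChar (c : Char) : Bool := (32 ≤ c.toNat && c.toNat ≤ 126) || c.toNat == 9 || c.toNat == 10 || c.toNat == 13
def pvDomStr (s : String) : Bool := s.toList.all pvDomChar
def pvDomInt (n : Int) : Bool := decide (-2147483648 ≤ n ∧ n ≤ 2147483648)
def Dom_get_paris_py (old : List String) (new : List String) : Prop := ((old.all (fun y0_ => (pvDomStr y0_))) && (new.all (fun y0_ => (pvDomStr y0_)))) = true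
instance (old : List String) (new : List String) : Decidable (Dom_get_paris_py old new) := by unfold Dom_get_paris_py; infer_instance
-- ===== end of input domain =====

-- B replaces A's running buf/start state machine by a boundary-index table plus a
-- pairwise pass over consecutive boundaries (objective: alternative decomposition).

-- ===== PORT A =====
-- Loop body of A's `for idx in range(len(old))`.  Indices produced by range are
-- natural numbers and, inside Pre_, in range for `new`, so Python's new[idx] is
-- exactly `new.getD idx ""` and old[start:idx] (0 ≤ start ≤ idx) is exactly
-- `(old.drop start).take (idx - start)` there.
def pvStepA (old : List String) (new : List String)
    (st : Nat × String × List (String × List String)) (idx : Nat) :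
    Nat × String × List (String × List String) :=
  let ph := new.getD idx ""
  if ph ≠ "" then
    (idx, ph,
      if st.2.1 ≠ "" then st.2.2 ++ [(st.2.1, (old.drop st.1).take (idx - st.1))]
      else st.2.2)
  else st

def get_paris_py (old : List String) (new : List String) : List (String × List String) :=
  let st := (List.range old.length).foldl (pvStepA old new) (0, "", [])
  -- Python raises ValueError here when st.buf = ""; those inputs are outside Pre_.
  st.2.2 ++ [(st.2.1, old.drop st.1)]

-- ===== PORT B =====
def get_paris_py_alt (old : List String) (new : List String) : List (String × List String) :=
  let bounds := (List.range old.length).filter (fun i => decide (new.getD i "" ≠ ""))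
  -- Python raises ValueError here when bounds = []; those inputs are outside Pre_.
  (bounds.zip (bounds.drop 1 ++ [old.length])).map
    (fun p => (new.getD p.1 "", (old.drop p.1).take (p.2 - p.1)))

-- ===== PRECONDITION & SPEC =====
-- Pre_ excludes exactly the inputs where Python A raises: an IndexError when new is
-- shorter than old, and a ValueError when no marker among the first len(old) entries
-- of new is non-empty (in particular when old is empty).  B raises identically there.
def Pre_get_paris_py (old : List String) (new : List String) : Prop :=
  old.length ≤ new.length ∧ ∃ i < old.length, new.getD i "" ≠ ""
instance (old : List String) (new : List String) : Decidable (Pre_get_paris_py old new) := by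
  unfold Pre_get_paris_py; infer_instance

def pvWitness_get_paris_py : List String × List String :=
  (["a", "b", "c"], ["x", "", "y"])

def Spec_get_paris_py (old : List String) (new : List String) (out : List (String × List String)) : Prop := out = get_paris_py_alt old new
instance (old : List String) (new : List String) (out : List (String × List String)) : Decidable (Spec_get_paris_py old new out) := by unfold Spec_get_paris_py; infer_instance

-- ===== CLAIM (what is proved, stated in full; the proofs are below) =====
def Claim_equal_get_paris_py : Prop := ∀ (old : List String) (new : List String), Dom_get_paris_py old new → Pre_get_paris_py old new → Spec_get_paris_py old new (get_paris_py old new)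

-- ===== LEMMAS AND PROOFS =====

-- The segment chain starting at boundary s with marker b, over the later boundaries m.
def pvChain (old : List String) (new : List String) (s : Nat) (b : String) :
    List Nat → List (String × List String)
  | [] => [(b, old.drop s)]
  | i :: m => (b, (old.drop s).take (i - s)) :: pvChain old new i (new.getD i "") m

-- The always-boundary step (A's positive branch).
def pvStepA' (old : List String) (new : List String)
    (st : Nat × String × List (String × List String)) (i : Nat) :
    Nat × String × List (String × List String) :=
  (i, new.getD i "",
    if st.2.1 ≠ "" then st.2.2 ++ [(st.2.1, (old.drop st.1).take (i - st.1))]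
    else st.2.2)

theorem pv_foldl_filter (old new : List String) :
    ∀ (l : List Nat) (st : Nat × String × List (String × List String)),
      l.foldl (pvStepA old new) st
        = (l.filter (fun i => decide (new.getD i "" ≠ ""))).foldl (pvStepA' old new) st := by
  intro l
  induction l with
  | nil => intro st; rfl
  | cons i l ih =>
    intro st
    by_cases h : new.getD i "" ≠ ""
    all_goals
      simp only [List.getD] at h
      simp [h, List.foldl_cons, ih, pvStepA, pvStepA']

theorem pv_foldl_chain (old new : List String) :
    ∀ (m : List Nat) (s : Nat) (b : String) (r : List (String × List String)),
      b ≠ "" → (∀ j ∈ m, new.getD j "" ≠ "") →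
      (let st := m.foldl (pvStepA' old new) (s, b, r)
       st.2.2 ++ [(st.2.1, old.drop st.1)]) = r ++ pvChain old new s b m := by
  intro m
  induction m with
  | nil => intro s b r _ _; simp [pvChain]
  | cons i m ih =>
    intro s b r hb hm
    have hi : new.getD i "" ≠ "" := hm i (by simp)
    have hm' : ∀ j ∈ m, new.getD j "" ≠ "" := fun j hj => hm j (by simp [hj])
    simp only [List.foldl_cons]
    have hstep : pvStepA' old new (s, b, r) i
        = (i, new.getD i "", r ++ [(b, (old.drop s).take (i - s))]) := by
      simp [pvStepA', hb]
    rw [hstep, ih i (new.getD i "") _ hi hm']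
    simp [pvChain]

theorem pv_zip_chain (old new : List String) :
    ∀ (t : List Nat) (h : Nat),
      (((h :: t).zip (t ++ [old.length])).map
        (fun p => (new.getD p.1 "", (old.drop p.1).take (p.2 - p.1))))
        = pvChain old new h (new.getD h "") t := by
  intro t
  induction t with
  | nil =>
    intro h
    have ht : List.take (old.length - h) (List.drop h old) = List.drop h old :=
      List.take_of_length_le (by simp)
    simp [pvChain, ht]
  | cons i t ih =>
    intro h
    simp only [List.zip_cons_cons, List.map_cons, List.cons_append]
    rw [ih i]
    simp [pvChain]

-- ===== VERDICT (by name: the statement is the Claim_ definition above) =====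
theorem get_paris_py_spec : Claim_equal_get_paris_py := by
  intro old new _ pre
  unfold Spec_get_paris_py get_paris_py get_paris_py_alt
  obtain ⟨-, i, hi, hgi⟩ := pre
  have hmem : i ∈ (List.range old.length).filter (fun i => decide (new.getD i "" ≠ "")) := by
    have hgi' : ¬ new[i]?.getD "" = "" := by simpa [List.getD] using hgi
    simp [List.mem_filter, List.mem_range, hi, hgi']
  obtain ⟨h, t, hbounds⟩ :
      ∃ h t, (List.range old.length).filter (fun i => decide (new.getD i "" ≠ "")) = h :: t := by
    cases hb : (List.range old.length).filter (fun i => decide (new.getD i "" ≠ "")) with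
    | nil => rw [hb] at hmem; simp at hmem
    | cons h t => exact ⟨h, t, rfl⟩
  have hall : ∀ j ∈ h :: t, new.getD j "" ≠ "" := by
    intro j hj
    have : j ∈ (List.range old.length).filter (fun i => decide (new.getD i "" ≠ "")) := by
      rw [hbounds]; exact hj
    simpa using (List.of_mem_filter this)
  rw [pv_foldl_filter, hbounds]
  simp only [List.foldl_cons]
  have hstep0 : pvStepA' old new (0, "", []) h = (h, new.getD h "", []) := by
    simp [pvStepA']
  rw [hstep0,
    pv_foldl_chain old new t h (new.getD h "") [] (hall h (by simp))
      (fun j hj => hall j (by simp [hj]))]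
  rw [List.drop_one] at *
  rw [show (h :: t).tail = t from rfl, pv_zip_chain old new t h]
  simp
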